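-- pv_equiv track=rewrite | github.com/lishehao-ctrl/RPG_Demo | rpg_backend/author/workflow.py | _split_at_first_marker
-- ===== SOURCE A (Python) =====
-- def _split_at_first_marker(text: str, markers: tuple[str, ...]) -> tuple[str, str | None]:
--     lowered = text.casefold()
--     found: tuple[int, str] | None = None
--     for marker in markers:
--         index = lowered.find(f" {marker} ")
--         if index >= 0 and (found is None or index < found[0]):
--             found = (index, marker)
--     if found is None:
--         return text, None
--     index, marker = found
--     head = text[:index].strip(" ,.;:")
--     tail = text[index + len(marker) + 2 :].strip(" ,.;:")
--     return head, f"{marker} {tail}" if tail else marker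
-- ===== SOURCE B (Python) =====
-- def _split_at_first_marker(text: str, markers: tuple[str, ...]) -> tuple[str, str | None]:
--     # Single left-to-right scan over positions: the first position where any
--     # padded marker matches is the minimal find-index, and trying markers in
--     # tuple order there reproduces A's tie-break.  Padded patterns are built
--     # once, and only positions holding a space are tried (every pattern starts
--     # with one).
--     lowered = text.casefold()
--     pats = [(marker, f" {marker} ") for marker in markers]
--     for i in range(len(lowered)):
--         if lowered[i] == " ":
--             for marker, pat in pats:
--                 if lowered.startswith(pat, i):
--                     head = text[:i].strip(" ,.;:")
--                     tail = text[i + len(marker) + 2 :].strip(" ,.;:")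
--                     return head, f"{marker} {tail}" if tail else marker
--     return text, None
-- ===== Notes on version B (the rewrite author's own statement) =====
-- stated objective: faster
-- what changed: A runs a separate full-text str.find pass for every marker and keeps the minimum index in an accumulator; B makes one left-to-right scan that tries the precomputed padded patterns only at space positions and returns at the first position where any matches (markers in tuple order there), so it stops at the earliest hit instead of always completing one whole-text pass per marker.
import Mathlib
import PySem

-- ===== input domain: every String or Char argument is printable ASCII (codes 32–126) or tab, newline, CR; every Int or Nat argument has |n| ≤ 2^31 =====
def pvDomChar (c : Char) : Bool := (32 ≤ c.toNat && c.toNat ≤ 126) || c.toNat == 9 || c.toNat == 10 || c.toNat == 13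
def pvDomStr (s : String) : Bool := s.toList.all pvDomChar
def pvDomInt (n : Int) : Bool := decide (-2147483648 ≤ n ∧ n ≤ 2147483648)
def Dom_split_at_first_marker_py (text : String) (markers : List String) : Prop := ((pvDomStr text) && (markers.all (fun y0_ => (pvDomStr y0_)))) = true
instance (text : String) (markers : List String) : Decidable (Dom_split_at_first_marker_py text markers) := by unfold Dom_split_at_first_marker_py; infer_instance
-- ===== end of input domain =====

-- B replaces A's per-marker find-and-keep-minimum fold by a single left-to-right scan over
-- positions (first matching position = minimal index, markers tried in tuple order there);
-- same return value, different traversal.  str.casefold is ported as PySem lower (exact on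
-- the ASCII input domain Dom, where casefold = lower).

-- ===== PORT A =====
-- f" {marker} "
def pvPat (marker : String) : List Char := ' ' :: (marker.toList ++ [' '])

-- the body of A's `for marker in markers` loop (state: `found`)
def pvStepA (lowered : List Char) (found : Option (Int × String)) (marker : String) : Option (Int × String) :=
  let index := PySem.Chars.find lowered (pvPat marker)
  if decide (0 ≤ index) && found.all (fun f => decide (index < f.1)) then some (index, marker) else found

-- head/tail slicing+stripping and the result pair (identical lines in both Python sources)
def pvRender (text : String) (index : Int) (marker : String) : String × Option String :=
  let t := text.toList
  let head := PySem.Chars.stripChars (PySem.Chars.slice t none (some index)) (" ,.;:".toList)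
  let tail := PySem.Chars.stripChars (PySem.Chars.slice t (some (index + (marker.toList.length : Int) + 2)) none) (" ,.;:".toList)
  (String.ofList head, some (if tail ≠ [] then String.ofList (marker.toList ++ ' ' :: tail) else marker))

def split_at_first_marker_py (text : String) (markers : List String) : String × Option String :=
  let lowered := PySem.Chars.lower text.toList   -- casefold = lower on the ASCII domain
  match markers.foldl (pvStepA lowered) none with
  | none => (text, none)
  | some (index, marker) => pvRender text index marker

-- ===== PORT B =====
-- B's `for i in range(len(lowered))` loop: `suffix` is lowered[i:], structural recursion on it;
-- `pats` is B's precomputed (marker, f" {marker} ") list; the space guard and the inner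
-- `for marker, pat in pats: if lowered.startswith(pat, i)` early-return loop (find?) as in Source B.
def pvScanB (text : String) (pats : List (String × List Char)) (suffix : List Char) (i : Nat) : String × Option String :=
  match suffix with
  | [] => (text, none)
  | c :: rest =>
    if c = ' ' then
      match pats.find? (fun p => PySem.Chars.startswith suffix p.2) with
      | some p => pvRender text (i : Int) p.1
      | none => pvScanB text pats rest (i + 1)
    else pvScanB text pats rest (i + 1)

def split_at_first_marker_py_alt (text : String) (markers : List String) : String × Option String :=
  pvScanB text (markers.map (fun m => (m, pvPat m))) (PySem.Chars.lower text.toList) 0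

-- ===== PRECONDITION & SPEC =====
def Spec_split_at_first_marker_py (text : String) (markers : List String) (out : String × Option String) : Prop := out = split_at_first_marker_py_alt text markers
instance (text : String) (markers : List String) (out : String × Option String) : Decidable (Spec_split_at_first_marker_py text markers out) := by unfold Spec_split_at_first_marker_py; infer_instance

-- ===== CLAIM (what is proved, stated in full; the proofs are below) =====
def Claim_equal_split_at_first_marker_py : Prop := ∀ (text : String) (markers : List String), Dom_split_at_first_marker_py text markers → Spec_split_at_first_marker_py text markers (split_at_first_marker_py text markers)

-- ===== LEMMAS AND PROOFS =====

-- a nonempty pattern never matches at a position: the step keeps the accumulator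
theorem pvFold_const (L : List Char) (ms : List String) (acc : Option (Int × String))
    (h : ∀ m ∈ ms, PySem.Chars.find L (pvPat m) < 0) :
    ms.foldl (pvStepA L) acc = acc := by
  induction ms generalizing acc with
  | nil => rfl
  | cons m ms ih =>
    have hm := h m (by simp)
    have : pvStepA L acc m = acc := by
      simp [pvStepA, not_le.mpr hm]
    rw [List.foldl_cons, this]
    exact ih _ (fun m' hm' => h m' (by simp [hm']))

theorem pvStepA_of_neg (L : List Char) (acc : Option (Int × String)) (m : String)
    (h : PySem.Chars.find L (pvPat m) < 0) : pvStepA L acc m = acc := by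
  simp [pvStepA, not_le.mpr h]

theorem pvStepA_none (L : List Char) (m : String)
    (h : 0 ≤ PySem.Chars.find L (pvPat m)) :
    pvStepA L none m = some (PySem.Chars.find L (pvPat m), m) := by
  simp [pvStepA, h]

theorem pvStepA_some_lt (L : List Char) (p : Int × String) (m : String)
    (h : 0 ≤ PySem.Chars.find L (pvPat m)) (hlt : PySem.Chars.find L (pvPat m) < p.1) :
    pvStepA L (some p) m = some (PySem.Chars.find L (pvPat m), m) := by
  simp [pvStepA, h, hlt]

theorem pvStepA_some_ge (L : List Char) (p : Int × String) (m : String)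
    (hge : p.1 ≤ PySem.Chars.find L (pvPat m)) :
    pvStepA L (some p) m = some p := by
  simp [pvStepA, not_lt.mpr hge]

theorem pvFold_gt (L : List Char) (ms : List String) (k : Int) (acc : Option (Int × String))
    (hk0 : 0 ≤ k) (hacc : ∀ f ∈ acc, k < f.1)
    (h : ∀ m ∈ ms, PySem.Chars.find L (pvPat m) < 0 ∨ k < PySem.Chars.find L (pvPat m)) :
    ∀ f ∈ ms.foldl (pvStepA L) acc, k < f.1 := by
  induction ms generalizing acc with
  | nil => exact hacc
  | cons m ms ih =>
    rw [List.foldl_cons]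
    refine ih _ ?_ (fun m' hm' => h m' (by simp [hm']))
    rcases h m (by simp) with hlt | hgt
    · rw [pvStepA_of_neg L acc m hlt]; exact hacc
    · have h0 : 0 ≤ PySem.Chars.find L (pvPat m) := by omega
      cases acc with
      | none =>
        rw [pvStepA_none L m h0]
        intro f hf
        simp at hf
        rw [← hf]
        exact hgt
      | some p =>
        by_cases hlt2 : PySem.Chars.find L (pvPat m) < p.1
        · rw [pvStepA_some_lt L p m h0 hlt2]
          intro f hf
          simp at hf
          rw [← hf]
          exact hgt
        · rw [pvStepA_some_ge L p m (not_lt.mp hlt2)]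
          exact hacc

theorem pvFold_keep2 (L : List Char) (ms : List String) (i : Int) (m0 : String)
    (h : ∀ m ∈ ms, PySem.Chars.find L (pvPat m) < 0 ∨ i ≤ PySem.Chars.find L (pvPat m)) :
    ms.foldl (pvStepA L) (some (i, m0)) = some (i, m0) := by
  induction ms with
  | nil => rfl
  | cons m ms ih =>
    rw [List.foldl_cons]
    rcases h m (by simp) with hlt | hge
    · rw [pvStepA_of_neg L _ m hlt]
      exact ih (fun m' hm' => h m' (by simp [hm']))
    · rw [pvStepA_some_ge L (i, m0) m hge]
      exact ih (fun m' hm' => h m' (by simp [hm']))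

-- the hit at the minimal position wins the fold
theorem pvFold_hit (L : List Char) (ms₁ ms₂ : List String) (m : String) (k : Nat)
    (h₁ : ∀ m' ∈ ms₁, PySem.Chars.find L (pvPat m') < 0 ∨ (k : Int) < PySem.Chars.find L (pvPat m'))
    (hm : PySem.Chars.find L (pvPat m) = (k : Int))
    (h₂ : ∀ m' ∈ ms₂, PySem.Chars.find L (pvPat m') < 0 ∨ (k : Int) ≤ PySem.Chars.find L (pvPat m')) :
    (ms₁ ++ m :: ms₂).foldl (pvStepA L) none = some ((k : Int), m) := by
  rw [List.foldl_append, List.foldl_cons]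
  have hacc : ∀ f ∈ ms₁.foldl (pvStepA L) (none : Option (Int × String)), (k : Int) < f.1 :=
    pvFold_gt L ms₁ k none (Int.natCast_nonneg k) (by simp) h₁
  have h0 : (0 : Int) ≤ PySem.Chars.find L (pvPat m) := by rw [hm]; exact Int.natCast_nonneg k
  have hstep : pvStepA L (ms₁.foldl (pvStepA L) none) m = some ((k : Int), m) := by
    cases hacc' : ms₁.foldl (pvStepA L) (none : Option (Int × String)) with
    | none => rw [pvStepA_none L m h0, hm]
    | some p =>
      have hlt : PySem.Chars.find L (pvPat m) < p.1 := by
        rw [hm]; exact hacc p (by rw [hacc']; simp)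
      rw [pvStepA_some_lt L p m h0 hlt, hm]
  rw [hstep]
  exact pvFold_keep2 L ms₂ k m h₂

-- find L p = k  when p matches at k and nowhere below
theorem pvFind_eq (L p : List Char) (k : Nat) (hk : p <+: L.drop k)
    (hlow : ∀ j, j < k → ¬ p <+: L.drop j) :
    PySem.Chars.find L p = (k : Int) := by
  have hinf : p <:+: L := by
    rw [← PySem.Chars.isIn_iff_infix, ← PySem.Chars.exists_prefix_drop_iff_isIn]
    exact ⟨k, hk⟩
  have h0 : (0 : Int) ≤ PySem.Chars.find L p := (PySem.Chars.find_nonneg_iff L p).mpr hinf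
  obtain ⟨hpre, hmin⟩ := PySem.Chars.find_spec h0
  have h1 : ¬ (PySem.Chars.find L p).toNat < k := fun hc => hlow _ hc hpre
  have h2 : ¬ k < (PySem.Chars.find L p).toNat := fun hc => hmin k hc hk
  omega

-- find points at a real hit, or is negative
theorem pvFind_cases (L p : List Char) :
    PySem.Chars.find L p < 0 ∨
      (0 ≤ PySem.Chars.find L p ∧ p <+: L.drop (PySem.Chars.find L p).toNat) := by
  rcases lt_or_ge (PySem.Chars.find L p) 0 with h | h
  · exact Or.inl h
  · exact Or.inr ⟨h, (PySem.Chars.find_spec h).1⟩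

-- the main scan/fold equivalence, by fuel induction over the remaining suffix
theorem pvScan_eq (text : String) (markers : List String) (L : List Char) :
    ∀ (n k : Nat), L.length - k ≤ n →
      (∀ j, j < k → ∀ m ∈ markers, ¬ pvPat m <+: L.drop j) →
      pvScanB text (markers.map (fun m => (m, pvPat m))) (L.drop k) k =
        (match markers.foldl (pvStepA L) none with
         | none => (text, none)
         | some (index, marker) => pvRender text index marker) := by
  intro n
  induction n with
  | zero =>
    intro k hn hk
    have hlen : L.length ≤ k := by omega
    have hdrop : L.drop k = [] := List.drop_eq_nil_of_le hlen
    rw [hdrop]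
    have : markers.foldl (pvStepA L) none = none := by
      apply pvFold_const
      intro m hm
      rcases pvFind_cases L (pvPat m) with h | ⟨h0, hpre⟩
      · exact h
      · exfalso
        have hj : (PySem.Chars.find L (pvPat m)).toNat < k ∨ k ≤ (PySem.Chars.find L (pvPat m)).toNat := by omega
        rcases hj with hj | hj
        · exact hk _ hj m hm hpre
        · have : L.drop (PySem.Chars.find L (pvPat m)).toNat = [] :=
            List.drop_eq_nil_of_le (by omega)
          rw [this] at hpre
          have := List.IsPrefix.length_le hpre
          simp [pvPat] at this
    rw [this]
    rfl
  | succ n ih =>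
    intro k hn hk
    cases hdrop : L.drop k with
    | nil =>
      rw [← hdrop]
      have hlen : L.length ≤ k := by
        by_contra hc
        have : L.drop k ≠ [] := by
          apply List.ne_nil_of_length_pos
          rw [List.length_drop]; omega
        exact this hdrop
      exact ih k (by omega) hk
    | cons c rest =>
      have hklt : k < L.length := by
        by_contra hc
        rw [List.drop_eq_nil_of_le (by omega)] at hdrop
        simp at hdrop
      have hrest : rest = L.drop (k + 1) := by
        rw [← List.tail_drop, hdrop]
        rfl
      have hnomatch : (∀ m ∈ markers, ¬ pvPat m <+: (c :: rest)) →
          (∀ j, j < k + 1 → ∀ m ∈ markers, ¬ pvPat m <+: L.drop j) := by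
        intro hnone j hj m hm
        rcases Nat.lt_or_ge j k with hjk | hjk
        · exact hk j hjk m hm
        · have hjek : j = k := by omega
          subst hjek
          rw [hdrop]
          exact hnone m hm
      by_cases hc : c = ' '
      · conv_lhs => rw [pvScanB]
        rw [if_pos hc, List.find?_map]
        cases hfind : markers.find?
            ((fun p => PySem.Chars.startswith (c :: rest) p.2) ∘ (fun m => (m, pvPat m))) with
        | some m =>
          rw [List.find?_eq_some_iff_append] at hfind
          obtain ⟨hpm, ms₁, ms₂, rfl, hbefore⟩ := hfind
          simp only [Function.comp] at hpm hbefore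
          have hhit : pvPat m <+: L.drop k := by
            rw [hdrop]; exact (PySem.Chars.startswith_iff _ _).mp hpm
          have hmk : PySem.Chars.find L (pvPat m) = (k : Int) :=
            pvFind_eq L (pvPat m) k hhit (fun j hj => hk j hj m (by simp))
          have h₁ : ∀ m' ∈ ms₁,
              PySem.Chars.find L (pvPat m') < 0 ∨ (k : Int) < PySem.Chars.find L (pvPat m') := by
            intro m' hm'
            rcases pvFind_cases L (pvPat m') with h | ⟨h0, hpre⟩
            · exact Or.inl h
            · right
              have hne : (PySem.Chars.find L (pvPat m')).toNat ≠ k := by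
                intro hcc
                have : pvPat m' <+: L.drop k := by rw [← hcc]; exact hpre
                have hsw : PySem.Chars.startswith (c :: rest) (pvPat m') = true := by
                  rw [PySem.Chars.startswith_iff, ← hdrop]; exact this
                have := hbefore m' hm'
                simp [hsw] at this
              have : ¬ (PySem.Chars.find L (pvPat m')).toNat < k :=
                fun hcc => hk _ hcc m' (by simp [hm']) hpre
              omega
          have h₂ : ∀ m' ∈ ms₂,
              PySem.Chars.find L (pvPat m') < 0 ∨ (k : Int) ≤ PySem.Chars.find L (pvPat m') := by
            intro m' hm'
            rcases pvFind_cases L (pvPat m') with h | ⟨h0, hpre⟩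
            · exact Or.inl h
            · right
              have : ¬ (PySem.Chars.find L (pvPat m')).toNat < k :=
                fun hcc => hk _ hcc m' (by simp [hm']) hpre
              omega
          rw [pvFold_hit L ms₁ ms₂ m k h₁ hmk h₂]
          simp
        | none =>
          rw [hrest]
          apply ih (k + 1) (by omega)
          apply hnomatch
          intro m hm hpre
          have := List.find?_eq_none.mp hfind m hm
          simp only [Function.comp] at this
          exact this ((PySem.Chars.startswith_iff _ _).mpr hpre)
      · conv_lhs => rw [pvScanB]
        rw [if_neg hc, hrest]
        apply ih (k + 1) (by omega)
        apply hnomatch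
        intro m hm hpre
        obtain ⟨t, ht⟩ := hpre
        simp [pvPat] at ht
        exact hc ht.1.symm

-- ===== VERDICT (by name: the statement is the Claim_ definition above) =====
theorem split_at_first_marker_py_spec : Claim_equal_split_at_first_marker_py := by
  intro text markers _
  unfold Spec_split_at_first_marker_py split_at_first_marker_py split_at_first_marker_py_alt
  have := pvScan_eq text markers (PySem.Chars.lower text.toList)
    (PySem.Chars.lower text.toList).length 0 (by omega) (by omega)
  rw [List.drop_zero] at this
  exact this.symm
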